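-- pv_equiv track=rewrite | github.com/docker-sstc/mono | packages/seaf-cli/src/entrypoint.py | __mask_cmd
-- ===== SOURCE A (Python) =====
-- def __mask_cmd(cmd: list, mask_opts: list) -> list:
--     mask_cmd = []
--     mask = False
--     for x in cmd:
--         if mask:
--             mask_cmd.append('****')
--             mask = False
--             continue
--         if x in mask_opts:
--             mask = True
--         mask_cmd.append(x)
--     return mask_cmd
-- ===== SOURCE B (Python) =====
-- def __mask_cmd(cmd: list, mask_opts: list) -> list:
--     out = []
--     i = 0
--     n = len(cmd)
--     while i < n:
--         x = cmd[i]
--         if x in mask_opts and i + 1 < n: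
--             out.append(x)
--             out.append('****')
--             i += 2
--         else:
--             out.append(x)
--             i += 1
--     return out
-- ===== Notes on version B (the rewrite author's own statement) =====
-- stated objective: simpler
-- what changed: Replaces the forward-carried mask flag with an index loop that consumes option/value pairs directly (append opt and '****', advance by 2), emitting a trailing mask-option unchanged.
import Mathlib
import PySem

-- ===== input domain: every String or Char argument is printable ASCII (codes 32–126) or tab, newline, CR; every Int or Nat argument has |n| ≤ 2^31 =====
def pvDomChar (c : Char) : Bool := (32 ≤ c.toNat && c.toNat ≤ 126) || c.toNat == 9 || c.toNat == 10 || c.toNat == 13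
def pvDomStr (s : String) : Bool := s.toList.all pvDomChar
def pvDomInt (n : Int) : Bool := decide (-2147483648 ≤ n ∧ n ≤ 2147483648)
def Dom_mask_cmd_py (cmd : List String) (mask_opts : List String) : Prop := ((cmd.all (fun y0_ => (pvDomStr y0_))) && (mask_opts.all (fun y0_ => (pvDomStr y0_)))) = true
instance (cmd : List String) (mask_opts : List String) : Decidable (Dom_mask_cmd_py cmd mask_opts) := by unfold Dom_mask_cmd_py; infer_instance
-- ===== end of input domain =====

-- B replaces A's forward-carried mask flag with a loop consuming option/value pairs directly (simpler decomposition, same cost).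

-- ===== PORT A =====
-- A: for x in cmd with state (mask_cmd, mask); if mask: append '****', reset; elif x in mask_opts: set mask; always append x otherwise.
def mask_cmd_py (cmd : List String) (mask_opts : List String) : List String :=
  (cmd.foldl (fun (st : List String × Bool) x =>
      if st.2 then (st.1 ++ ["****"], false)
      else if x ∈ mask_opts then (st.1 ++ [x], true)
      else (st.1 ++ [x], false))
    ([], false)).1

-- ===== PORT B =====
-- B: while i < n; if cmd[i] in mask_opts and i+1 < n, emit cmd[i] and '****' and skip 2; else emit cmd[i] and skip 1.
def mask_cmd_py_alt_loop (mask_opts : List String) : List String → List String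
  | [] => []
  | [x] => [x]
  | x :: y :: rest =>
      if x ∈ mask_opts then x :: "****" :: mask_cmd_py_alt_loop mask_opts rest
      else x :: mask_cmd_py_alt_loop mask_opts (y :: rest)

def mask_cmd_py_alt (cmd : List String) (mask_opts : List String) : List String :=
  mask_cmd_py_alt_loop mask_opts cmd

-- ===== PRECONDITION & SPEC =====
def Spec_mask_cmd_py (cmd : List String) (mask_opts : List String) (out : List String) : Prop := out = mask_cmd_py_alt cmd mask_opts
instance (cmd : List String) (mask_opts : List String) (out : List String) : Decidable (Spec_mask_cmd_py cmd mask_opts out) := by unfold Spec_mask_cmd_py; infer_instance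

-- ===== CLAIM (what is proved, stated in full; the proofs are below) =====
def Claim_equal_mask_cmd_py : Prop := ∀ (cmd : List String) (mask_opts : List String), Dom_mask_cmd_py cmd mask_opts → Spec_mask_cmd_py cmd mask_opts (mask_cmd_py cmd mask_opts)

-- ===== LEMMAS AND PROOFS =====

-- A's loop in cons form, for reasoning.
def maskGoA (mask_opts : List String) : List String → Bool → List String
  | [], _ => []
  | _ :: rest, true => "****" :: maskGoA mask_opts rest false
  | x :: rest, false =>
      if x ∈ mask_opts then x :: maskGoA mask_opts rest true
      else x :: maskGoA mask_opts rest false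

theorem maskFoldl_eq_goA (mask_opts : List String) (cmd : List String) (acc : List String) (mask : Bool) :
    (cmd.foldl (fun (st : List String × Bool) x =>
      if st.2 then (st.1 ++ ["****"], false)
      else if x ∈ mask_opts then (st.1 ++ [x], true)
      else (st.1 ++ [x], false)) (acc, mask)).1 = acc ++ maskGoA mask_opts cmd mask := by
  induction cmd generalizing acc mask with
  | nil => simp [maskGoA]
  | cons x rest ih =>
    cases mask with
    | true => simp [maskGoA, ih]
    | false =>
      by_cases h : x ∈ mask_opts <;> simp [maskGoA, h, ih]

theorem maskGoA_eq_alt (mask_opts : List String) (cmd : List String) :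
    maskGoA mask_opts cmd false = mask_cmd_py_alt_loop mask_opts cmd := by
  fun_induction mask_cmd_py_alt_loop mask_opts cmd with
  | case1 => rfl
  | case2 x =>
    by_cases h : x ∈ mask_opts <;> simp [maskGoA, h]
  | case3 x y rest h ih => simp [maskGoA, h, ih]
  | case4 x y rest h ih =>
    conv_lhs => rw [maskGoA]
    simp [h, ih]

-- ===== VERDICT (by name: the statement is the Claim_ definition above) =====
theorem mask_cmd_py_spec : Claim_equal_mask_cmd_py := by
  intro cmd mask_opts _
  unfold Spec_mask_cmd_py mask_cmd_py mask_cmd_py_alt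
  rw [maskFoldl_eq_goA, maskGoA_eq_alt]
  simp
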